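-- pv_equiv track=rewrite | github.com/tlijkkkk/mark_v | leetcode-practice/leetcode_practice/two_pointers/sliding_windows/leetcode3578_count_partitions_max_min_diff_most_k.py | count_partitions_max_min_diff_most_k
-- ===== SOURCE A (Python) =====
-- from typing import List, Deque
-- from collections import deque
--
-- def count_partitions_max_min_diff_most_k(nums: List[int], k: int) -> int:
--     MOD = 10 ** 9 + 7
--     prefix_sum = [0] + [1] + [0] * len(nums)
--     mono_min: Deque[int] = deque()
--     mono_max: Deque[int] = deque()
--     dp = [1] + [0] * len(nums)
--     i = 0
--
--     for j in range(len(nums)):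
--         while mono_min and mono_min[-1] > nums[j]:
--             mono_min.pop()
--         mono_min.append(nums[j])
--
--         while mono_max and mono_max[-1] < nums[j]:
--             mono_max.pop()
--         mono_max.append(nums[j])
--
--         while mono_max[0] - mono_min[0] > k:
--             if nums[i] == mono_max[0]:
--                 mono_max.popleft()
--             elif nums[i] == mono_min[0]:
--                 mono_min.popleft()
--             i += 1
--
--         dp[j + 1] = (prefix_sum[j + 1] - prefix_sum[i]) % MOD
--         prefix_sum[j + 2] = (prefix_sum[j + 1] + dp[j + 1]) % MOD
--
--     return dp[-1]
-- ===== SOURCE B (Python) =====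
-- def count_partitions_max_min_diff_most_k(nums, k):
--     MOD = 10 ** 9 + 7
--     n = len(nums)
--     # phase 1: for each j, the smallest start lo such that max-min of nums[lo:j+1] <= k
--     left = []
--     lo = 0
--     for j in range(n):
--         while max(nums[lo:j + 1]) - min(nums[lo:j + 1]) > k:
--             lo += 1
--         left.append(lo)
--     # phase 2: dp over the left boundaries with prefix sums
--     dp = 1
--     prefix = [0, 1]
--     for j, l in enumerate(left):
--         dp = (prefix[j + 1] - prefix[l]) % MOD
--         prefix.append((prefix[j + 1] + dp) % MOD)
--     return dp
-- ===== Notes on version B (the rewrite author's own statement) =====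
-- stated objective: simpler
-- what changed: A's single fused pass with two value-based monotonic deques is replaced by two separate passes: a brute-force pass that finds each window's left boundary by recomputing max()/min() of the slice (no deques), then a standalone prefix-sum DP pass over that boundary list.
import Mathlib
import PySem

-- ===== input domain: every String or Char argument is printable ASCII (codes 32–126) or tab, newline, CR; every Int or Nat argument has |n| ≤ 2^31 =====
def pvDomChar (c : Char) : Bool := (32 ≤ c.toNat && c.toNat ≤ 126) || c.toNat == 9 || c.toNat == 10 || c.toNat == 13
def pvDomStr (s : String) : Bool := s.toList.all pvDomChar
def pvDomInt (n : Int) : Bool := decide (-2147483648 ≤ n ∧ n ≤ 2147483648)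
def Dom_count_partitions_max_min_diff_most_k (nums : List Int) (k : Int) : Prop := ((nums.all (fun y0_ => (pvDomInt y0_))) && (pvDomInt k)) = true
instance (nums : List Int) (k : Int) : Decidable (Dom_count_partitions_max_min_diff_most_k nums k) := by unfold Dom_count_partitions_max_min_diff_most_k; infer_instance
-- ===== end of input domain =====

-- B replaces A's fused monotonic-deque sliding window by two separate passes: a brute-force
-- left-boundary pass (recomputing max/min of each slice) and a prefix-sum DP pass (objective:
-- simpler, no speed claim).

-- ===== PORT A =====
-- deque as a List with its front at the head; 'while mono and mono[-1] > x: mono.pop()'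
def pvPopBackGt (x : Int) (d : List Int) : List Int :=
  match _h : d.getLast? with
  | none => d
  | some v => if v > x then pvPopBackGt x d.dropLast else d
termination_by d.length
decreasing_by
  have hne : d ≠ [] := by rintro rfl; simp at _h
  have hp : 0 < d.length := List.length_pos_of_ne_nil hne
  simp [List.length_dropLast]; omega

-- 'while mono and mono[-1] < x: mono.pop()'
def pvPopBackLt (x : Int) (d : List Int) : List Int :=
  match _h : d.getLast? with
  | none => d
  | some v => if v < x then pvPopBackLt x d.dropLast else d
termination_by d.length
decreasing_by
  have hne : d ≠ [] := by rintro rfl; simp at _h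
  have hp : 0 < d.length := List.length_pos_of_ne_nil hne
  simp [List.length_dropLast]; omega

-- 'while mono_max[0] - mono_min[0] > k: …'; fuel only makes the loop total (Python raises
-- IndexError on an empty deque there, which the none-branch mirrors by stopping)
def pvShrinkA (nums : List Int) (k : Int) : Nat → Int → List Int → List Int → Int × List Int × List Int
  | 0, i, mn, mm => (i, mn, mm)
  | fuel+1, i, mn, mm =>
    match mm.head?, mn.head? with
    | some M, some m =>
      if M - m > k then
        let v := PySem.List.pyGetD nums i 0
        if v = M then pvShrinkA nums k fuel (i+1) mn mm.tail
        else if v = m then pvShrinkA nums k fuel (i+1) mn.tail mm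
        else pvShrinkA nums k fuel (i+1) mn mm
      else (i, mn, mm)
    | _, _ => (i, mn, mm)

-- one iteration of A's 'for j in range(len(nums))'; state = (i, mono_min, mono_max, prefix_sum, dp)
def pvStepA (nums : List Int) (k : Int)
    (st : Int × List Int × List Int × List Int × List Int) (j : Nat) :
    Int × List Int × List Int × List Int × List Int :=
  let x := PySem.List.pyGetD nums (j : Int) 0
  let mn1 := pvPopBackGt x st.2.1 ++ [x]
  let mm1 := pvPopBackLt x st.2.2.1 ++ [x]
  let s := pvShrinkA nums k (nums.length + 1) st.1 mn1 mm1
  let pref := st.2.2.2.1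
  let dv := PySem.Int.mod
    (PySem.List.pyGetD pref ((j : Int) + 1) 0 - PySem.List.pyGetD pref s.1 0) (10 ^ 9 + 7)
  (s.1, s.2.1, s.2.2,
   pref.set (j + 2) (PySem.Int.mod (PySem.List.pyGetD pref ((j : Int) + 1) 0 + dv) (10 ^ 9 + 7)),
   st.2.2.2.2.set (j + 1) dv)

def count_partitions_max_min_diff_most_k (nums : List Int) (k : Int) : Int :=
  let n := nums.length
  let fin := (List.range n).foldl (pvStepA nums k)
    (0, [], [], [0, 1] ++ List.replicate n 0, [1] ++ List.replicate n 0)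
  PySem.List.pyGetD fin.2.2.2.2 (-1) 0

-- ===== PORT B =====
-- 'while max(nums[lo:j+1]) - min(nums[lo:j+1]) > k: lo += 1'; fuel only makes the loop total
-- (Python raises ValueError on max() of an empty slice, mirrored by the stop branch)
def pvShrinkB (nums : List Int) (k : Int) : Nat → Int → Int → Int
  | 0, lo, _ => lo
  | fuel+1, lo, j =>
    let w := PySem.List.slice nums (some lo) (some (j + 1))
    match PySem.List.max? w (fun y => y), PySem.List.min? w (fun y => y) with
    | some M, some m => if M - m > k then pvShrinkB nums k fuel (lo + 1) j else lo
    | _, _ => lo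

-- phase 1 body: advance lo, append it to the left-boundary list
def pvStepB1 (nums : List Int) (k : Int) (st : Int × List Int) (j : Nat) : Int × List Int :=
  let lo := pvShrinkB nums k (nums.length + 1) st.1 (j : Int)
  (lo, st.2 ++ [lo])

-- phase 2 body: 'dp = (prefix[j+1] - prefix[l]) % MOD; prefix.append((prefix[j+1] + dp) % MOD)'
def pvStepB2 (st : Int × List Int) (jl : Int × Int) : Int × List Int :=
  let pref := st.2
  let dv := PySem.Int.mod
    (PySem.List.pyGetD pref (jl.1 + 1) 0 - PySem.List.pyGetD pref jl.2 0) (10 ^ 9 + 7)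
  (dv, pref ++ [PySem.Int.mod (PySem.List.pyGetD pref (jl.1 + 1) 0 + dv) (10 ^ 9 + 7)])

def count_partitions_max_min_diff_most_k_alt (nums : List Int) (k : Int) : Int :=
  let lefts := ((List.range nums.length).foldl (pvStepB1 nums k) (0, [])).2
  ((PySem.List.enumerate lefts).foldl pvStepB2 (1, [0, 1])).1

-- ===== PRECONDITION & SPEC =====
-- Pre_ excludes nonempty nums with k < 0: there A raises IndexError (it empties a deque while
-- shrinking an unsatisfiable window) and B raises ValueError (max() of an empty slice).
def Pre_count_partitions_max_min_diff_most_k (nums : List Int) (k : Int) : Prop :=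
  nums = [] ∨ 0 ≤ k
instance (nums : List Int) (k : Int) : Decidable (Pre_count_partitions_max_min_diff_most_k nums k) := by
  unfold Pre_count_partitions_max_min_diff_most_k; infer_instance

def pvWitness_count_partitions_max_min_diff_most_k : List Int × Int := ([1, 3, 2, 7], 2)

def Spec_count_partitions_max_min_diff_most_k (nums : List Int) (k : Int) (out : Int) : Prop := out = count_partitions_max_min_diff_most_k_alt nums k
instance (nums : List Int) (k : Int) (out : Int) : Decidable (Spec_count_partitions_max_min_diff_most_k nums k out) := by unfold Spec_count_partitions_max_min_diff_most_k; infer_instance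

-- ===== CLAIM (what is proved, stated in full; the proofs are below) =====
def Claim_equal_count_partitions_max_min_diff_most_k : Prop := ∀ (nums : List Int) (k : Int), Dom_count_partitions_max_min_diff_most_k nums k → Pre_count_partitions_max_min_diff_most_k nums k → Spec_count_partitions_max_min_diff_most_k nums k (count_partitions_max_min_diff_most_k nums k)

-- ===== LEMMAS AND PROOFS =====

-- the window of indices [i, e) of nums
def pvWin (nums : List Int) (i e : Nat) : List Int := (nums.drop i).take (e - i)

-- the elements of w that are ≥ every later element (contents of A's max deque)
def pvMaxStruct : List Int → List Int
  | [] => []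
  | x :: t => if t.all (fun y => y ≤ x) then x :: pvMaxStruct t else pvMaxStruct t

-- the elements of w that are ≤ every later element (contents of A's min deque)
def pvMinStruct : List Int → List Int
  | [] => []
  | x :: t => if t.all (fun y => x ≤ y) then x :: pvMinStruct t else pvMinStruct t

-- the window w still violates the max-min ≤ k constraint
def pvBad (k : Int) (w : List Int) : Bool :=
  match PySem.List.max? w (fun y => y), PySem.List.min? w (fun y => y) with
  | some M, some m => decide (M - m > k)
  | _, _ => false

-- B's phase-2 fold over a left-boundary list
def pvPh2 (ls : List Int) : Int × List Int :=
  (PySem.List.enumerate ls).foldl pvStepB2 (1, [0, 1])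

lemma pvPopBackLt_nil (x : Int) : pvPopBackLt x [] = [] := by
  unfold pvPopBackLt; rfl

lemma pvPopBackGt_nil (x : Int) : pvPopBackGt x [] = [] := by
  unfold pvPopBackGt; rfl

lemma pvPopBackLt_concat (x : Int) (d : List Int) (b : Int) :
    pvPopBackLt x (d ++ [b]) = if b < x then pvPopBackLt x d else d ++ [b] := by
  unfold pvPopBackLt
  split
  · next h => simp at h
  · next v h =>
      rw [List.getLast?_concat] at h
      cases h
      simp only [List.dropLast_concat]
      by_cases hb : b < x
      · simp only [hb, if_true]; rw [pvPopBackLt]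
      · simp [hb]

lemma pvPopBackGt_concat (x : Int) (d : List Int) (b : Int) :
    pvPopBackGt x (d ++ [b]) = if b > x then pvPopBackGt x d else d ++ [b] := by
  unfold pvPopBackGt
  split
  · next h => simp at h
  · next v h =>
      rw [List.getLast?_concat] at h
      cases h
      simp only [List.dropLast_concat]
      by_cases hb : b > x
      · simp only [hb, if_true]; rw [pvPopBackGt]
      · simp [hb]

lemma pvPopBackLt_cons (x a : Int) (d : List Int) (h : ¬ a < x) :
    pvPopBackLt x (a :: d) = a :: pvPopBackLt x d := by
  induction d using List.reverseRecOn with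
  | nil => rw [pvPopBackLt_nil]
           show pvPopBackLt x ([] ++ [a]) = [a]
           rw [pvPopBackLt_concat]; simp [h]
  | append_singleton ds b ih =>
      rw [show a :: (ds ++ [b]) = (a :: ds) ++ [b] from rfl, pvPopBackLt_concat, pvPopBackLt_concat]
      split <;> simp [ih]

lemma pvPopBackGt_cons (x a : Int) (d : List Int) (h : ¬ x < a) :
    pvPopBackGt x (a :: d) = a :: pvPopBackGt x d := by
  induction d using List.reverseRecOn with
  | nil => rw [pvPopBackGt_nil]
           show pvPopBackGt x ([] ++ [a]) = [a]
           rw [pvPopBackGt_concat]; simp [h]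
  | append_singleton ds b ih =>
      rw [show a :: (ds ++ [b]) = (a :: ds) ++ [b] from rfl, pvPopBackGt_concat, pvPopBackGt_concat]
      split <;> simp [ih]

lemma pvPopBackLt_all (x : Int) (d : List Int) (h : ∀ y ∈ d, y < x) :
    pvPopBackLt x d = [] := by
  induction d using List.reverseRecOn with
  | nil => exact pvPopBackLt_nil x
  | append_singleton ds b ih =>
      rw [pvPopBackLt_concat]
      simp only [h b (by simp), if_true]
      exact ih (fun y hy => h y (by simp [hy]))

lemma pvPopBackGt_all (x : Int) (d : List Int) (h : ∀ y ∈ d, x < y) :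
    pvPopBackGt x d = [] := by
  induction d using List.reverseRecOn with
  | nil => exact pvPopBackGt_nil x
  | append_singleton ds b ih =>
      rw [pvPopBackGt_concat]
      simp only [show b > x from h b (by simp), if_true]
      exact ih (fun y hy => h y (by simp [hy]))

lemma pvMaxStruct_subset (l : List Int) : ∀ y ∈ pvMaxStruct l, y ∈ l := by
  induction l with
  | nil => simp [pvMaxStruct]
  | cons a t ih =>
      intro y hy
      by_cases hc : t.all (fun z => z ≤ a) <;> simp [pvMaxStruct, hc] at hy
      · rcases hy with rfl | hy
        · simp
        · simp [ih y hy]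
      · simp [ih y hy]

lemma pvMinStruct_subset (l : List Int) : ∀ y ∈ pvMinStruct l, y ∈ l := by
  induction l with
  | nil => simp [pvMinStruct]
  | cons a t ih =>
      intro y hy
      by_cases hc : t.all (fun z => a ≤ z) <;> simp [pvMinStruct, hc] at hy
      · rcases hy with rfl | hy
        · simp
        · simp [ih y hy]
      · simp [ih y hy]

lemma pvMaxStruct_append (l : List Int) (x : Int) :
    pvMaxStruct (l ++ [x]) = pvPopBackLt x (pvMaxStruct l) ++ [x] := by
  induction l with
  | nil => simp [pvMaxStruct, pvPopBackLt_nil]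
  | cons a t ih =>
      by_cases ht : t.all (fun z => z ≤ a)
      · by_cases hxa : x ≤ a
        · have hall : (t ++ [x]).all (fun z => z ≤ a) := by
            simp only [List.all_append] at *; simp [ht, hxa]
          simp only [List.cons_append, pvMaxStruct, hall, if_true, ih, ht]
          rw [pvPopBackLt_cons x a _ (by omega)]
          simp
        · have hnall : ¬ (t ++ [x]).all (fun z => z ≤ a) := by
            simp only [List.all_append]; simp; intro _; omega
          simp only [List.cons_append, pvMaxStruct, if_neg hnall, if_pos ht, ih]
          have h1 : pvPopBackLt x (a :: pvMaxStruct t) = [] :=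
            pvPopBackLt_all x _ (by
              intro y hy
              rcases List.mem_cons.mp hy with rfl | hy
              · omega
              · have := List.all_eq_true.mp ht y (pvMaxStruct_subset t y hy)
                simp at this; omega)
          have h2 : pvPopBackLt x (pvMaxStruct t) = [] :=
            pvPopBackLt_all x _ (by
              intro y hy
              have := List.all_eq_true.mp ht y (pvMaxStruct_subset t y hy)
              simp at this; omega)
          rw [h1, h2]
      · have hnall : ¬ (t ++ [x]).all (fun z => z ≤ a) := by
          simp only [List.all_append]; simp; intro h; exact absurd (by simpa using h) ht
        simp only [List.cons_append, pvMaxStruct, if_neg hnall, if_neg ht, ih]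

lemma pvMinStruct_append (l : List Int) (x : Int) :
    pvMinStruct (l ++ [x]) = pvPopBackGt x (pvMinStruct l) ++ [x] := by
  induction l with
  | nil => simp [pvMinStruct, pvPopBackGt_nil]
  | cons a t ih =>
      by_cases ht : t.all (fun z => a ≤ z)
      · by_cases hxa : a ≤ x
        · have hall : (t ++ [x]).all (fun z => a ≤ z) := by
            simp only [List.all_append] at *; simp [ht, hxa]
          simp only [List.cons_append, pvMinStruct, hall, if_true, ih, ht]
          rw [pvPopBackGt_cons x a _ (by omega)]
          simp
        · have hnall : ¬ (t ++ [x]).all (fun z => a ≤ z) := by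
            simp only [List.all_append]; simp; intro _; omega
          simp only [List.cons_append, pvMinStruct, if_neg hnall, if_pos ht, ih]
          have h1 : pvPopBackGt x (a :: pvMinStruct t) = [] :=
            pvPopBackGt_all x _ (by
              intro y hy
              rcases List.mem_cons.mp hy with rfl | hy
              · omega
              · have := List.all_eq_true.mp ht y (pvMinStruct_subset t y hy)
                simp at this; omega)
          have h2 : pvPopBackGt x (pvMinStruct t) = [] :=
            pvPopBackGt_all x _ (by
              intro y hy
              have := List.all_eq_true.mp ht y (pvMinStruct_subset t y hy)
              simp at this; omega)
          rw [h1, h2]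
      · have hnall : ¬ (t ++ [x]).all (fun z => a ≤ z) := by
          simp only [List.all_append]; simp; intro h; exact absurd (by simpa using h) ht
        simp only [List.cons_append, pvMinStruct, if_neg hnall, if_neg ht, ih]

lemma pvMaxStruct_spec (w : List Int) (hw : w ≠ []) :
    ∃ M, (pvMaxStruct w).head? = some M ∧ M ∈ w ∧ ∀ y ∈ w, y ≤ M := by
  induction w with
  | nil => exact absurd rfl hw
  | cons a t ih =>
      by_cases ht : t.all (fun z => z ≤ a)
      · refine ⟨a, by simp [pvMaxStruct, ht], by simp, ?_⟩
        intro y hy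
        rcases List.mem_cons.mp hy with rfl | hy
        · exact le_refl y
        · simpa using List.all_eq_true.mp ht y hy
      · have htne : t ≠ [] := by rintro rfl; simp at ht
        obtain ⟨M, h1, h2, h3⟩ := ih htne
        refine ⟨M, by simp [pvMaxStruct, ht, h1], by simp [h2], ?_⟩
        intro y hy
        rcases List.mem_cons.mp hy with rfl | hy
        · simp only [List.all_eq_true] at ht
          push Not at ht
          obtain ⟨z, hz, hzy⟩ := ht
          have := h3 z hz
          simp at hzy; omega
        · exact h3 y hy

lemma pvMinStruct_spec (w : List Int) (hw : w ≠ []) :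
    ∃ m, (pvMinStruct w).head? = some m ∧ m ∈ w ∧ ∀ y ∈ w, m ≤ y := by
  induction w with
  | nil => exact absurd rfl hw
  | cons a t ih =>
      by_cases ht : t.all (fun z => a ≤ z)
      · refine ⟨a, by simp [pvMinStruct, ht], by simp, ?_⟩
        intro y hy
        rcases List.mem_cons.mp hy with rfl | hy
        · exact le_refl y
        · simpa using List.all_eq_true.mp ht y hy
      · have htne : t ≠ [] := by rintro rfl; simp at ht
        obtain ⟨m, h1, h2, h3⟩ := ih htne
        refine ⟨m, by simp [pvMinStruct, ht, h1], by simp [h2], ?_⟩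
        intro y hy
        rcases List.mem_cons.mp hy with rfl | hy
        · simp only [List.all_eq_true] at ht
          push Not at ht
          obtain ⟨z, hz, hzy⟩ := ht
          have := h3 z hz
          simp at hzy; omega
        · exact h3 y hy

lemma pvMaxStruct_head (w : List Int) (M : Int)
    (h : PySem.List.max? w (fun y => y) = some M) :
    (pvMaxStruct w).head? = some M := by
  have hw : w ≠ [] := by
    rintro rfl; exact absurd (PySem.List.max?_mem h) (by simp)
  obtain ⟨M', h1, h2, h3⟩ := pvMaxStruct_spec w hw
  have hmem : M ∈ w := PySem.List.max?_mem h
  have hmax : ∀ y ∈ w, y ≤ M := PySem.List.max?_isMax h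
  have : M = M' := le_antisymm (h3 M hmem) (hmax M' h2)
  rw [h1, this]

lemma pvMinStruct_head (w : List Int) (m : Int)
    (h : PySem.List.min? w (fun y => y) = some m) :
    (pvMinStruct w).head? = some m := by
  have hw : w ≠ [] := by
    rintro rfl; exact absurd (PySem.List.min?_mem h) (by simp)
  obtain ⟨m', h1, h2, h3⟩ := pvMinStruct_spec w hw
  have hmem : m ∈ w := PySem.List.min?_mem h
  have hmin : ∀ y ∈ w, m ≤ y := PySem.List.min?_isMin h
  have : m = m' := le_antisymm (hmin m' h2) (h3 m hmem)
  rw [h1, this]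

lemma pvWin_ne_nil (nums : List Int) (i e : Nat) (h1 : i < e) (h2 : e ≤ nums.length) :
    pvWin nums i e ≠ [] := by
  have : (pvWin nums i e).length = min (e - i) (nums.length - i) := by
    simp [pvWin]
  intro hnil
  rw [hnil] at this
  simp at this
  omega

lemma pvWin_cons (nums : List Int) (i e : Nat) (h1 : i < e) (h2 : e ≤ nums.length) :
    pvWin nums i e = nums[i]'(by omega) :: pvWin nums (i+1) e := by
  unfold pvWin
  rw [List.drop_eq_getElem_cons (by omega), show e - i = (e - (i+1)) + 1 by omega,
    List.take_succ_cons]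

lemma pvWin_snoc (nums : List Int) (i e : Nat) (h1 : i ≤ e) (h2 : e < nums.length) :
    pvWin nums i (e+1) = pvWin nums i e ++ [nums[e]] := by
  unfold pvWin
  rw [show e + 1 - i = (e - i) + 1 by omega, List.take_add_one]
  have : (nums.drop i)[e - i]? = some nums[e] := by
    rw [List.getElem?_drop]
    rw [List.getElem?_eq_getElem (by omega)]
    congr 1
    congr 1
    omega
  rw [this]
  rfl

lemma pvBad_mono (k : Int) (w : List Int) (x : Int) (hw : w ≠ [])
    (h : pvBad k w = true) : pvBad k (w ++ [x]) = true := by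
  obtain ⟨M, hM⟩ : ∃ M, PySem.List.max? w (fun y => y) = some M := by
    cases hM : PySem.List.max? w (fun y => y) with
    | none => exact absurd ((PySem.List.max?_eq_none_iff _ _).mp hM) hw
    | some M => exact ⟨M, rfl⟩
  obtain ⟨m, hm⟩ : ∃ m, PySem.List.min? w (fun y => y) = some m := by
    cases hm : PySem.List.min? w (fun y => y) with
    | none => exact absurd ((PySem.List.min?_eq_none_iff _ _).mp hm) hw
    | some m => exact ⟨m, rfl⟩
  obtain ⟨M', hM'⟩ : ∃ M', PySem.List.max? (w ++ [x]) (fun y => y) = some M' := by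
    cases hM' : PySem.List.max? (w ++ [x]) (fun y => y) with
    | none => exact absurd ((PySem.List.max?_eq_none_iff _ _).mp hM') (fun hq => by simp at hq)
    | some M' => exact ⟨M', rfl⟩
  obtain ⟨m', hm'⟩ : ∃ m', PySem.List.min? (w ++ [x]) (fun y => y) = some m' := by
    cases hm' : PySem.List.min? (w ++ [x]) (fun y => y) with
    | none => exact absurd ((PySem.List.min?_eq_none_iff _ _).mp hm') (fun hq => by simp at hq)
    | some m' => exact ⟨m', rfl⟩
  unfold pvBad at h ⊢
  rw [hM, hm] at h
  rw [hM', hm']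
  have h1 : M ≤ M' := PySem.List.max?_isMax hM' M (by simp [PySem.List.max?_mem hM])
  have h2 : m' ≤ m := PySem.List.min?_isMin hm' m (by simp [PySem.List.min?_mem hm])
  simp only [decide_eq_true_eq] at h ⊢
  omega

lemma pvGetD_append (l1 l2 : List Int) (t : Nat) (d : Int) (h : t < l1.length) :
    PySem.List.pyGetD (l1 ++ l2) (t : Int) d = PySem.List.pyGetD l1 (t : Int) d := by
  rw [PySem.List.pyGetD_natCast, PySem.List.pyGetD_natCast]
  simp [List.getD, List.getElem?_append_left (by omega : t < l1.length)]

lemma pvPh2_snoc (ls : List Int) (x : Int) :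
    pvPh2 (ls ++ [x]) = pvStepB2 (pvPh2 ls) ((ls.length : Int), x) := by
  unfold pvPh2
  rw [show (PySem.List.enumerate (ls ++ [x]) : List (Int × Int)) = PySem.List.enumerate (ls ++ [x]) 0 from rfl,
    PySem.List.enumerate_append, List.foldl_append]
  simp [PySem.List.enumerate_cons, PySem.List.enumerate_nil]

lemma pvPh2_len (ls : List Int) : (pvPh2 ls).2.length = ls.length + 2 := by
  induction ls using List.reverseRecOn with
  | nil => rfl
  | append_singleton ds b ih =>
      rw [pvPh2_snoc]
      simp [pvStepB2, ih]

lemma pvShrink_spec (nums : List Int) (k : Int) (hk : 0 ≤ k) :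
    ∀ (fuel i e : Nat), i < e → e ≤ nums.length → e ≤ fuel + i →
    ∃ r : Nat, i ≤ r ∧ r < e ∧
      pvShrinkA nums k fuel (i : Int) (pvMinStruct (pvWin nums i e)) (pvMaxStruct (pvWin nums i e))
        = ((r : Int), pvMinStruct (pvWin nums r e), pvMaxStruct (pvWin nums r e)) ∧
      pvShrinkB nums k fuel (i : Int) ((e : Int) - 1) = (r : Int) ∧
      pvBad k (pvWin nums r e) = false ∧
      ∀ p, i ≤ p → p < r → pvBad k (pvWin nums p e) = true := by
  intro fuel
  induction fuel with
  | zero => intro i e h1 h2 h3; omega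
  | succ f ih =>
    intro i e h1 h2 h3
    have hwne := pvWin_ne_nil nums i e h1 h2
    obtain ⟨M, hM⟩ : ∃ M, PySem.List.max? (pvWin nums i e) (fun y => y) = some M := by
      cases hq : PySem.List.max? (pvWin nums i e) (fun y => y) with
      | none => exact absurd ((PySem.List.max?_eq_none_iff _ _).mp hq) hwne
      | some M => exact ⟨M, rfl⟩
    obtain ⟨m, hm⟩ : ∃ m, PySem.List.min? (pvWin nums i e) (fun y => y) = some m := by
      cases hq : PySem.List.min? (pvWin nums i e) (fun y => y) with
      | none => exact absurd ((PySem.List.min?_eq_none_iff _ _).mp hq) hwne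
      | some m => exact ⟨m, rfl⟩
    have hMhead := pvMaxStruct_head _ _ hM
    have hmhead := pvMinStruct_head _ _ hm
    have hMmem := PySem.List.max?_mem hM
    have hMmax := PySem.List.max?_isMax hM
    have hmmem := PySem.List.min?_mem hm
    have hmmin := PySem.List.min?_isMin hm
    have hslice : PySem.List.slice nums (some (i : Int)) (some ((e : Int) - 1 + 1)) = pvWin nums i e := by
      rw [show ((e : Int) - 1 + 1) = ((e : Nat) : Int) by ring, PySem.List.slice_natCast]
      rfl
    by_cases hbad : M - m > k
    · have hne : i + 1 < e := by
        by_contra hcon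
        have he : e = i + 1 := by omega
        subst he
        have hw1 : pvWin nums i (i + 1) = [nums[i]'(by omega)] := by
          rw [pvWin_cons nums i (i + 1) (by omega) h2]
          simp [pvWin]
        rw [hw1] at hMmem hmmem
        simp at hMmem hmmem
        omega
      have hin : i < nums.length := by omega
      have hv : PySem.List.pyGetD nums (i : Int) 0 = nums[i] := by
        rw [PySem.List.pyGetD_natCast]
        simp [List.getD, List.getElem?_eq_getElem hin]
      have hcons := pvWin_cons nums i e h1 h2
      obtain ⟨r, hir, hre, hA, hB, hbadr, hminr⟩ := ih (i + 1) e hne h2 (by omega)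
      have hcasti : (i : Int) + 1 = ((i + 1 : Nat) : Int) := by push_cast; ring
      have hbadi : pvBad k (pvWin nums i e) = true := by
        unfold pvBad; rw [hM, hm]; simpa using hbad
      have hMm : M ≠ m := by
        intro hq
        have := hmmin M hMmem
        omega
      have hvleM : nums[i] ≤ M := by
        have := hMmax (nums[i]'hin) (by rw [hcons]; exact List.mem_cons_self)
        simpa using this
      have hmlev : m ≤ nums[i] := by
        have := hmmin (nums[i]'hin) (by rw [hcons]; exact List.mem_cons_self)
        simpa using this
      have hMt : M ≠ nums[i] → M ∈ pvWin nums (i+1) e := by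
        intro hq
        have hw := hMmem
        rw [hcons] at hw
        rcases List.mem_cons.mp hw with hq2 | hq2
        · exact absurd hq2 hq
        · exact hq2
      have hmt : m ≠ nums[i] → m ∈ pvWin nums (i+1) e := by
        intro hq
        have hw := hmmem
        rw [hcons] at hw
        rcases List.mem_cons.mp hw with hq2 | hq2
        · exact absurd hq2 hq
        · exact hq2
      have hmaxdrop : nums[i] ≠ M →
          pvMaxStruct (pvWin nums i e) = pvMaxStruct (pvWin nums (i+1) e) := by
        intro hq
        rw [hcons]
        have hnall : ¬ (pvWin nums (i+1) e).all (fun z => z ≤ nums[i]) := by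
          rw [List.all_eq_true]
          intro hall
          have := hall M (hMt (fun hz => hq hz.symm))
          simp at this
          omega
        simp [pvMaxStruct, hnall]
      have hmindrop : nums[i] ≠ m →
          pvMinStruct (pvWin nums i e) = pvMinStruct (pvWin nums (i+1) e) := by
        intro hq
        rw [hcons]
        have hnall : ¬ (pvWin nums (i+1) e).all (fun z => nums[i] ≤ z) := by
          rw [List.all_eq_true]
          intro hall
          have := hall m (hmt (fun hz => hq hz.symm))
          simp at this
          omega
        simp [pvMinStruct, hnall]
      have hmaxkeep : nums[i] = M →
          pvMaxStruct (pvWin nums i e) = nums[i] :: pvMaxStruct (pvWin nums (i+1) e) := by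
        intro hvM
        rw [hcons]
        have hall : (pvWin nums (i+1) e).all (fun z => z ≤ nums[i]) := by
          rw [List.all_eq_true]
          intro z hz
          have hzM : z ≤ M := by
            have hz' : z ∈ pvWin nums i e := by
              rw [hcons]; exact List.mem_cons_of_mem _ hz
            simpa using hMmax z hz'
          simp
          omega
        simp [pvMaxStruct, hall]
      have hminkeep : nums[i] = m →
          pvMinStruct (pvWin nums i e) = nums[i] :: pvMinStruct (pvWin nums (i+1) e) := by
        intro hvm
        rw [hcons]
        have hall : (pvWin nums (i+1) e).all (fun z => nums[i] ≤ z) := by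
          rw [List.all_eq_true]
          intro z hz
          have hmz : m ≤ z := by
            have hz' : z ∈ pvWin nums i e := by
              rw [hcons]; exact List.mem_cons_of_mem _ hz
            simpa using hmmin z hz'
          simp
          omega
        simp [pvMinStruct, hall]
      refine ⟨r, by omega, hre, ?_, ?_, hbadr, ?_⟩
      · -- one step of A's shrink loop, then the IH
        rw [pvShrinkA]
        simp only [hMhead, hmhead]
        rw [if_pos hbad]
        simp only [hv]
        by_cases hvM : nums[i] = M
        · rw [if_pos hvM, hmaxkeep hvM, hmindrop (by omega), List.tail_cons, hcasti]
          exact hA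
        · rw [if_neg hvM]
          by_cases hvm : nums[i] = m
          · rw [if_pos hvm, hminkeep hvm, hmaxdrop hvM, List.tail_cons, hcasti]
            exact hA
          · rw [if_neg hvm, hmaxdrop hvM, hmindrop hvm, hcasti]
            exact hA
      · -- one step of B's shrink loop, then the IH
        rw [pvShrinkB]
        simp only [hslice, hM, hm]
        rw [if_pos hbad, hcasti]
        exact hB
      · intro p hpi hpr
        rcases Nat.eq_or_lt_of_le hpi with hq | hq
        · rw [← hq]; exact hbadi
        · exact hminr p hq hpr
    · refine ⟨i, le_rfl, h1, ?_, ?_, ?_, by omega⟩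
      · rw [pvShrinkA]
        simp only [hMhead, hmhead]
        rw [if_neg hbad]
      · rw [pvShrinkB]
        simp only [hslice, hM, hm]
        rw [if_neg hbad]
      · unfold pvBad
        rw [hM, hm]
        simpa using hbad

lemma pvMain (nums : List Int) (k : Int) (hk : 0 ≤ k) :
    ∀ (j : Nat), j ≤ nums.length →
    ∃ (i : Nat) (lefts : List Int) (dpinit : List Int),
      (List.range j).foldl (pvStepB1 nums k) (0, []) = ((i : Int), lefts) ∧
      i ≤ j ∧ lefts.length = j ∧ dpinit.length = j ∧
      (List.range j).foldl (pvStepA nums k)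
        (0, [], [], [0, 1] ++ List.replicate nums.length 0, [1] ++ List.replicate nums.length 0)
        = ((i : Int), pvMinStruct (pvWin nums i j), pvMaxStruct (pvWin nums i j),
           (pvPh2 lefts).2 ++ List.replicate (nums.length - j) 0,
           (dpinit ++ [(pvPh2 lefts).1]) ++ List.replicate (nums.length - j) 0) ∧
      pvBad k (pvWin nums i j) = false ∧
      (∀ p, p < i → pvBad k (pvWin nums p j) = true) := by
  intro j
  induction j with
  | zero =>
      intro _
      refine ⟨0, [], [], rfl, le_rfl, rfl, rfl, ?_, ?_, ?_⟩
      · have h1 : pvWin nums 0 0 = [] := by simp [pvWin]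
        simp only [List.range_zero, List.foldl_nil, h1, Nat.sub_zero, Nat.cast_zero]
        rfl
      · have h1 : pvWin nums 0 0 = [] := by simp [pvWin]
        rw [h1]; rfl
      · intro p hp; omega
  | succ j ihj =>
      intro hj1
      obtain ⟨i, lefts, dpinit, hB1, hij, hlen, hdlen, hA, hbadold, hminold⟩ := ihj (by omega)
      have hjn : j < nums.length := by omega
      obtain ⟨r, hir, hre, hshA, hshB, hbadnew, hminnew⟩ :=
        pvShrink_spec nums k hk (nums.length + 1) i (j + 1) (by omega) (by omega) (by omega)
      rw [show (((j + 1 : Nat) : Int) - 1) = ((j : Nat) : Int) by push_cast; ring] at hshB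
      have hx : PySem.List.pyGetD nums ((j : Nat) : Int) 0 = nums[j] := by
        rw [PySem.List.pyGetD_natCast]
        simp [List.getD, List.getElem?_eq_getElem hjn]
      have hsnoc := pvWin_snoc nums i j hij hjn
      have hmn1 : pvPopBackGt (nums[j]) (pvMinStruct (pvWin nums i j)) ++ [nums[j]]
          = pvMinStruct (pvWin nums i (j + 1)) := by
        rw [hsnoc, pvMinStruct_append]
      have hmm1 : pvPopBackLt (nums[j]) (pvMaxStruct (pvWin nums i j)) ++ [nums[j]]
          = pvMaxStruct (pvWin nums i (j + 1)) := by
        rw [hsnoc, pvMaxStruct_append]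
      have hPlen : (pvPh2 lefts).2.length = j + 2 := by rw [pvPh2_len, hlen]
      have hread1 : PySem.List.pyGetD ((pvPh2 lefts).2 ++ List.replicate (nums.length - j) 0) ((j : Int) + 1) 0
          = PySem.List.pyGetD (pvPh2 lefts).2 ((j : Int) + 1) 0 := by
        rw [show ((j : Int) + 1) = ((j + 1 : Nat) : Int) by push_cast; ring]
        exact pvGetD_append _ _ (j + 1) 0 (by omega)
      have hread2 : PySem.List.pyGetD ((pvPh2 lefts).2 ++ List.replicate (nums.length - j) 0) ((r : Nat) : Int) 0
          = PySem.List.pyGetD (pvPh2 lefts).2 ((r : Nat) : Int) 0 :=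
        pvGetD_append _ _ r 0 (by omega)
      have hph2 : pvPh2 (lefts ++ [((r : Nat) : Int)])
          = pvStepB2 (pvPh2 lefts) (((j : Nat) : Int), ((r : Nat) : Int)) := by
        rw [pvPh2_snoc, hlen]
      have hsetdp : ∀ dv : Int,
          ((dpinit ++ [(pvPh2 lefts).1]) ++ List.replicate (nums.length - j) 0).set (j + 1) dv
          = ((dpinit ++ [(pvPh2 lefts).1]) ++ [dv]) ++ List.replicate (nums.length - (j + 1)) 0 := by
        intro dv
        have hL : (dpinit ++ [(pvPh2 lefts).1]).length = j + 1 := by simp [hdlen]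
        rw [List.set_append, if_neg (by omega), hL, Nat.sub_self,
          show nums.length - j = (nums.length - (j + 1)) + 1 by omega, List.replicate_succ]
        simp
      have hsetpref : ∀ q : Int,
          ((pvPh2 lefts).2 ++ List.replicate (nums.length - j) 0).set (j + 2) q
          = ((pvPh2 lefts).2 ++ [q]) ++ List.replicate (nums.length - (j + 1)) 0 := by
        intro q
        rw [List.set_append, if_neg (by omega), hPlen, Nat.sub_self,
          show nums.length - j = (nums.length - (j + 1)) + 1 by omega, List.replicate_succ]
        simp
      refine ⟨r, lefts ++ [((r : Nat) : Int)], dpinit ++ [(pvPh2 lefts).1],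
        ?_, by omega, by simp [hlen], by simp [hdlen], ?_, hbadnew, ?_⟩
      · rw [List.range_succ, List.foldl_append, hB1, List.foldl_cons, List.foldl_nil]
        simp only [pvStepB1]
        rw [hshB]
      · rw [List.range_succ, List.foldl_append, hA, List.foldl_cons, List.foldl_nil]
        simp only [pvStepA]
        rw [hx, hmn1, hmm1, hshA]
        simp only
        rw [hread1, hread2, hsetdp, hsetpref, hph2]
        simp only [pvStepB2]
      · intro p hp
        rcases Nat.lt_or_ge p i with hq | hq
        · have hbase := hminold p hq
          have hpw : pvWin nums p (j + 1) = pvWin nums p j ++ [nums[j]] :=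
            pvWin_snoc nums p j (by omega) hjn
          rw [hpw]
          exact pvBad_mono k _ _ (pvWin_ne_nil nums p j (by omega) (by omega)) hbase
        · exact hminnew p hq hp

-- ===== VERDICT (by name: the statement is the Claim_ definition above) =====
theorem count_partitions_max_min_diff_most_k_spec : Claim_equal_count_partitions_max_min_diff_most_k := by
  intro nums k _ hPre
  unfold Spec_count_partitions_max_min_diff_most_k
  rcases hPre with h | hk
  · subst h; rfl
  · obtain ⟨i, lefts, dpinit, hB1, _, _, _, hA, _, _⟩ := pvMain nums k hk nums.length le_rfl
    unfold count_partitions_max_min_diff_most_k count_partitions_max_min_diff_most_k_alt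
    simp only [hA, hB1, Nat.sub_self, List.replicate_zero, List.append_nil]
    rw [PySem.List.pyGetD_neg_one_append_singleton]
    rfl
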